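-- pv_equiv track=rewrite | github.com/Kok-Herng/gene-palindromes-finder | genePalindromes.py | CommonSequence
-- ===== SOURCE A (Python) =====
-- def CommonSequence(seq,revCom,minLength): #function to extract common sequence between the original and reverse complement
--     seqLength = len(seq) #compute the sequence length
--     commonSequence = [] #empty list to store common sequence
--
--     for i in range(seqLength,minLength-1,-1): #loop from the reverse of sequence
--     #until min palindrome length
--         for k in range(seqLength-i+1): #loop in the length of short sequence
--             if (seq[k:i+k] in revCom): #true if base present in reverse complement
--                 flag = 1
--                 for m in range(len(commonSequence)): #loop in the length of list
--                     if seq[k:i+k] in commonSequence[m]: #if base is already present in list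
--                         flag = 0
--                         break #break the loop
--
--                 if flag == 1: #if base is not already present in list
--                     commonSequence.append(seq[k:i+k]) #add base to the list
--
--     if len(commonSequence): #true if list is not empty
--         return(commonSequence) #return list that contains common sequences
--     else: #false if list is empty
--         pass
-- ===== SOURCE B (Python) =====
-- def CommonSequence(seq, revCom, minLength):
--     # Maximal common substrings, longest first: a common substring belongs in the
--     # output iff it is locally maximal, i.e. no occurrence of it in seq can be
--     # extended by one character (left or right) to a longer common substring.
--     # This local test replaces a containment scan over the growing result list;
--     # a hash set skips substrings already examined at the current length.
--     n = len(seq)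
--     result = []
--     seen = set()
--     for i in range(n, max(minLength, 1) - 1, -1):
--         for k in range(n - i + 1):
--             s = seq[k:k + i]
--             if s in seen or s not in revCom:
--                 continue
--             seen.add(s)
--             if not any(seq[p:p + i] == s
--                        and ((p + i < n and seq[p:p + i + 1] in revCom)
--                             or (p > 0 and seq[p - 1:p + i] in revCom))
--                        for p in range(n - i + 1)):
--                 result.append(s)
--     return result if result else None
-- ===== Notes on version B (the rewrite author's own statement) =====
-- stated objective: alternative
-- what changed: B drops A's inner containment scan over the growing result list: a substring is kept iff no occurrence of it in seq extends by one character (left or right) to a substring of revCom, with a hash set deduplicating equal substrings; B considers only positive lengths, so it returns None where A accidentally returns [""].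
-- intended difference: When minLength <= 0 and seq and revCom share no character, A's loop reaches length 0 and appends the empty string, returning [""]; B returns None, the intended answer since there is no actual common substring. — e.g. on CommonSequence("a", "b", 0): A returns some [""], B returns none
import Mathlib
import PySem

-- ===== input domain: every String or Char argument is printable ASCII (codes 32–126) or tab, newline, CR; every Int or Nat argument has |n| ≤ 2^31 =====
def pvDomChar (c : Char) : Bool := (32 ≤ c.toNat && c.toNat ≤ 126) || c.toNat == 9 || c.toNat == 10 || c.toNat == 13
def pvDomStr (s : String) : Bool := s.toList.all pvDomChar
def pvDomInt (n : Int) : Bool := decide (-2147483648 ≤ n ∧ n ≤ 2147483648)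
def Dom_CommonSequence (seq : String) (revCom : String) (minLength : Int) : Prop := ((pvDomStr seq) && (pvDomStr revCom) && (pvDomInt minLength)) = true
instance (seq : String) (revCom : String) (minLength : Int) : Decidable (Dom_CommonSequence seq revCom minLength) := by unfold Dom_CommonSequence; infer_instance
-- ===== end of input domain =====

-- B replaces A's containment scan over the growing result list by a local one-character
-- extendability test plus a hash-set dedup of equal substrings (objective: alternative);
-- B considers only positive lengths, so it returns none where A returns some [""].

-- ===== PORT A =====
-- inner dedup loop of A: flag = 1; for m in range(len(cs)): if s in cs[m]: flag = 0; break
def pvFlag (s : String) (cs : List String) : Int :=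
  (PySem.List.pyRange 0 (PySem.List.len cs) 1).foldl
    (fun flag m =>
      if flag = 1 ∧ PySem.Str.isIn s (PySem.List.pyGetD cs m "") then 0 else flag) 1

def CommonSequence (seq : String) (revCom : String) (minLength : Int) : Option (List String) :=
  let seqLength := PySem.Str.len seq
  let commonSequence : List String :=
    (PySem.List.pyRange seqLength (minLength - 1) (-1)).foldl (fun cs i =>
      (PySem.List.pyRange 0 (seqLength - i + 1) 1).foldl (fun cs k =>
        let s := PySem.Str.slice seq (some k) (some (i + k))
        if PySem.Str.isIn s revCom then
          if pvFlag s cs = 1 then cs ++ [s] else cs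
        else cs) cs) []
  if PySem.List.len commonSequence ≠ 0 then some commonSequence else none

-- ===== PORT B =====
-- any(seq[p:p+i] == s and ((p+i < n and seq[p:p+i+1] in revCom) or (p > 0 and seq[p-1:p+i] in revCom)) ...)
def pvExtendable (seq : String) (revCom : String) (n i : Int) (s : String) : Bool :=
  (PySem.List.pyRange 0 (n - i + 1) 1).any (fun p =>
    decide (PySem.Str.slice seq (some p) (some (p + i)) = s) &&
      ((decide (p + i < n) && PySem.Str.isIn (PySem.Str.slice seq (some p) (some (p + i + 1))) revCom) ||
       (decide (0 < p) && PySem.Str.isIn (PySem.Str.slice seq (some (p - 1)) (some (p + i))) revCom)))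

def CommonSequence_alt (seq : String) (revCom : String) (minLength : Int) : Option (List String) :=
  let n := PySem.Str.len seq
  let st : List String × PySem.Set String :=
    (PySem.List.pyRange n (max minLength 1 - 1) (-1)).foldl (fun st i =>
      (PySem.List.pyRange 0 (n - i + 1) 1).foldl (fun st k =>
        let s := PySem.Str.slice seq (some k) (some (k + i))
        if PySem.Set.contains st.2 s || !PySem.Str.isIn s revCom then st
        else
          let seen := PySem.Set.add st.2 s
          if !pvExtendable seq revCom n i s then (st.1 ++ [s], seen) else (st.1, seen)) st)
      ([], PySem.Set.empty)
  if st.1 ≠ [] then some st.1 else none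

-- ===== PRECONDITION & SPEC =====
-- When minLength ≤ 0 and seq and revCom share no character, A's loop reaches length 0,
-- appends the empty string and returns [""]; B returns none, the intended answer since
-- there is no actual common substring.
def D_CommonSequence (seq : String) (revCom : String) (minLength : Int) : Prop :=
  minLength ≤ 0 ∧ ∀ c ∈ seq.toList, c ∉ revCom.toList
instance (seq : String) (revCom : String) (minLength : Int) : Decidable (D_CommonSequence seq revCom minLength) := by unfold D_CommonSequence; infer_instance

def Spec_CommonSequence (seq : String) (revCom : String) (minLength : Int) (out : Option (List String)) : Prop := ¬ D_CommonSequence seq revCom minLength → out = CommonSequence_alt seq revCom minLength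
instance (seq : String) (revCom : String) (minLength : Int) (out : Option (List String)) : Decidable (Spec_CommonSequence seq revCom minLength out) := by unfold Spec_CommonSequence; infer_instance

def pvDiffWitness_CommonSequence : String × String × Int := ("a", "b", 0)
def pvDiffWitnessOut_CommonSequence : (Option (List String)) × (Option (List String)) := (some [""], none)

-- ===== CLAIM (what is proved, stated in full; the proofs are below) =====
def Claim_unchanged_CommonSequence : Prop := ∀ (seq : String) (revCom : String) (minLength : Int), Dom_CommonSequence seq revCom minLength → Spec_CommonSequence seq revCom minLength (CommonSequence seq revCom minLength)
def Claim_changed_CommonSequence : Prop := Dom_CommonSequence (pvDiffWitness_CommonSequence.1) (pvDiffWitness_CommonSequence.2.1) (pvDiffWitness_CommonSequence.2.2) ∧ D_CommonSequence (pvDiffWitness_CommonSequence.1) (pvDiffWitness_CommonSequence.2.1) (pvDiffWitness_CommonSequence.2.2) ∧ CommonSequence (pvDiffWitness_CommonSequence.1) (pvDiffWitness_CommonSequence.2.1) (pvDiffWitness_CommonSequence.2.2) = pvDiffWitnessOut_CommonSequence.1 ∧ CommonSequence_alt (pvDiffWitness_CommonSequence.1) (pvDiffWitness_CommonSequence.2.1)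 (pvDiffWitness_CommonSequence.2.2) = pvDiffWitnessOut_CommonSequence.2 ∧ pvDiffWitnessOut_CommonSequence.1 ≠ pvDiffWitnessOut_CommonSequence.2
def Claim_exact_CommonSequence : Prop := ∀ (seq : String) (revCom : String) (minLength : Int), Dom_CommonSequence seq revCom minLength → D_CommonSequence seq revCom minLength → CommonSequence seq revCom minLength ≠ CommonSequence_alt seq revCom minLength

-- ===== LEMMAS AND PROOFS =====

lemma toList_slice_nonneg (seq : String) (k i : Int) (hk : 0 ≤ k) (hi : 0 ≤ i) :
    (PySem.Str.slice seq (some k) (some (i + k))).toList =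
      (seq.toList.drop k.toNat).take i.toNat := by
  have h := PySem.List.slice_toNat seq.toList hk (by omega : (0:Int) ≤ i + k)
  have h2 : (i + k).toNat - k.toNat = i.toNat := by omega
  simp [PySem.Str.slice, h, h2]

lemma toList_slice_nonneg' (seq : String) (a b : Int) (ha : 0 ≤ a) (hb : a ≤ b) :
    (PySem.Str.slice seq (some a) (some b)).toList =
      (seq.toList.drop a.toNat).take (b - a).toNat := by
  have : b = (b - a) + a := by ring
  rw [this, toList_slice_nonneg seq a (b - a) ha (by omega)]
  congr 1
  omega

lemma flag_foldl_zero (s : String) (cs : List String) :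
    cs.foldl (fun flag t => if flag = 1 ∧ PySem.Str.isIn s t then 0 else flag) (0:Int) = 0 := by
  induction cs with
  | nil => rfl
  | cons t ts ih => simpa using ih

lemma flag_foldl_one_iff (s : String) (cs : List String) :
    cs.foldl (fun flag t => if flag = 1 ∧ PySem.Str.isIn s t then 0 else flag) (1:Int) = 1 ↔
      ∀ t ∈ cs, ¬ (s.toList <:+: t.toList) := by
  induction cs with
  | nil => simp
  | cons t ts ih =>
    rw [List.foldl_cons]
    by_cases h : PySem.Str.isIn s t = true
    · have : (if (1:Int) = 1 ∧ PySem.Str.isIn s t then (0:Int) else 1) = 0 := if_pos ⟨rfl, h⟩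
      rw [this, flag_foldl_zero]
      constructor
      · intro h01; exact absurd h01 (by norm_num)
      · intro hall
        exact absurd ((PySem.Str.isIn_iff_infix s t).mp h) (hall t (List.mem_cons_self))
    · have : (if (1:Int) = 1 ∧ PySem.Str.isIn s t then (0:Int) else 1) = 1 := if_neg (fun hc => h hc.2)
      rw [this, ih]
      constructor
      · rintro hall t' ht'
        rcases List.mem_cons.mp ht' with rfl | ht'
        · exact fun hinf => h ((PySem.Str.isIn_iff_infix s t').mpr hinf)
        · exact hall t' ht'
      · intro hall t' ht'; exact hall t' (List.mem_cons_of_mem _ ht')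

lemma pvExtendable_iff (seq revCom : String) (i : Nat) (s : String) :
    pvExtendable seq revCom (PySem.Str.len seq) (i:Int) s = true ↔
      ∃ p : Nat, p + i ≤ seq.toList.length ∧
        ((seq.toList.drop p).take i = s.toList) ∧
        ((p + i < seq.toList.length ∧ (seq.toList.drop p).take (i+1) <:+: revCom.toList) ∨
         (0 < p ∧ (seq.toList.drop (p-1)).take (i+1) <:+: revCom.toList)) := by
  unfold pvExtendable
  rw [List.any_eq_true]
  simp only [Bool.and_eq_true, Bool.or_eq_true, decide_eq_true_eq,
    PySem.Str.isIn_iff_infix, PySem.List.mem_pyRange_one, PySem.Str.len_eq]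
  constructor
  · rintro ⟨p, ⟨hp0, hpn⟩, heq, hdisj⟩
    refine ⟨p.toNat, by omega, ?_, ?_⟩
    · rw [← heq]
      rw [toList_slice_nonneg' seq p (p + i) hp0 (by omega)]
      congr 1 <;> omega
    · rcases hdisj with ⟨hlt, hinf⟩ | ⟨hpos, hinf⟩
      · left
        refine ⟨by omega, ?_⟩
        rw [toList_slice_nonneg' seq p (p + i + 1) hp0 (by omega)] at hinf
        have h1 : (p + (i:Int) + 1 - p).toNat = i + 1 := by omega
        rwa [h1] at hinf
      · right
        refine ⟨by omega, ?_⟩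
        rw [toList_slice_nonneg' seq (p - 1) (p + i) (by omega) (by omega)] at hinf
        have h1 : (p - 1).toNat = p.toNat - 1 := by omega
        have h2 : (p + (i:Int) - (p - 1)).toNat = i + 1 := by omega
        rwa [h1, h2] at hinf
  · rintro ⟨p, hpn, heq, hdisj⟩
    refine ⟨(p:Int), ⟨by omega, by omega⟩, ?_, ?_⟩
    · apply String.toList_inj.mp
      rw [toList_slice_nonneg' seq p ((p:Int) + i) (by omega) (by omega)]
      have h1 : ((p:Int) + i - p).toNat = i := by omega
      have h2 : ((p:Int)).toNat = p := by omega
      rw [h1, h2, heq]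
    · rcases hdisj with ⟨hlt, hinf⟩ | ⟨hpos, hinf⟩
      · left
        refine ⟨by omega, ?_⟩
        rw [toList_slice_nonneg' seq p ((p:Int) + i + 1) (by omega) (by omega)]
        have h1 : ((p:Int) + i + 1 - p).toNat = i + 1 := by omega
        have h2 : ((p:Int)).toNat = p := by omega
        rwa [h1, h2]
      · right
        refine ⟨by omega, ?_⟩
        rw [toList_slice_nonneg' seq ((p:Int) - 1) ((p:Int) + i) (by omega) (by omega)]
        have h1 : ((p:Int) - 1).toNat = p - 1 := by omega
        have h2 : ((p:Int) + i - ((p:Int) - 1)).toNat = i + 1 := by omega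
        rwa [h1, h2]

def pvCommon (revCom : String) (s : String) : Prop := s.toList <:+: revCom.toList

def pvIsSlice (seq : String) (jmin : Nat) (t : String) : Prop :=
  ∃ kk jj : Nat, kk + jj ≤ seq.toList.length ∧ jmin ≤ jj ∧
    t.toList = (seq.toList.drop kk).take jj

def pvInv (seq revCom : String) (jmin : Nat) (cs seen : List String) : Prop :=
  (∀ t ∈ cs, pvCommon revCom t ∧ pvIsSlice seq jmin t ∧ t ∈ seen) ∧
  (∀ s ∈ seen, pvCommon revCom s ∧ ∃ t ∈ cs, s.toList <:+: t.toList)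

def pvCov (seq revCom : String) (jmin : Nat) (cs : List String) : Prop :=
  ∀ kk jj : Nat, kk + jj ≤ seq.toList.length → jmin ≤ jj →
    (seq.toList.drop kk).take jj <:+: revCom.toList →
    ∃ t ∈ cs, (seq.toList.drop kk).take jj <:+: t.toList

lemma drop_take_infix {α : Type} (xs : List α) (m k : Nat) : (xs.drop m).take k <:+: xs :=
  ((List.take_prefix k (xs.drop m)).isInfix).trans (List.drop_suffix m xs).isInfix

lemma cons_head_drop (p : Nat) (xs : List Char) (h : p - 1 < xs.length) (hp : 1 ≤ p) (i : Nat) :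
    (xs.drop (p-1)).take (i+1) = xs[p-1] :: (xs.drop p).take i := by
  have hq : p - 1 + 1 = p := by omega
  rw [List.drop_eq_getElem_cons h, List.take_succ_cons, hq]

-- the fragment of t.toList = (L.drop kk).take jj starting at offset m, of width w (m + w ≤ jj):
lemma seg_of_slice (L : List Char) (kk jj m w : Nat) (hmw : m + w ≤ jj) :
    (((L.drop kk).take jj).drop m).take w = (L.drop (kk + m)).take w := by
  rw [List.drop_take, ← List.drop_drop, List.take_take]
  congr 1
  omega

lemma contained_iff_fwd (seq revCom : String) (i k : Nat) (hi : 1 ≤ i)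
    (hk : k + i ≤ seq.toList.length) (cs seen : List String)
    (hInv : pvInv seq revCom i cs seen)
    (s : String) (hs : s.toList = (seq.toList.drop k).take i) (hns : s ∉ seen)
    (t : String) (ht : t ∈ cs) (hst : s.toList <:+: t.toList) :
      ∃ p : Nat, p + i ≤ seq.toList.length ∧
        ((seq.toList.drop p).take i = s.toList) ∧
        ((p + i < seq.toList.length ∧ (seq.toList.drop p).take (i+1) <:+: revCom.toList) ∨
         (0 < p ∧ (seq.toList.drop (p-1)).take (i+1) <:+: revCom.toList)) := by
  obtain ⟨hcom, ⟨kk, jj, hkj, hij, htl⟩, htseen⟩ := hInv.1 t ht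
  set L := seq.toList with hL
  have hslen : s.toList.length = i := by
    rw [hs]; simp; omega
  have htlen : t.toList.length = jj := by
    rw [htl]; simp; omega
  by_cases hjj : jj = i
  · -- equal length: s = t ∈ seen, contradiction
    exfalso
    have : s.toList = t.toList := hst.eq_of_length (by omega)
    exact hns (String.toList_inj.mp this ▸ htseen)
  · have hjj' : i < jj := by
      have := hst.length_le; omega
    obtain ⟨a, b, hab⟩ := hst
    have hlens : a.length + (i + b.length) = jj := by
      have := congrArg List.length hab
      simp [hslen, htlen] at this
      omega
    set p := kk + a.length with hp
    have hsp : s.toList = (L.drop p).take i := by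
      have hdrop : t.toList.drop a.length = s.toList ++ b := by
        rw [← hab, List.append_assoc, List.drop_left]
      have h1 : (t.toList.drop a.length).take i = s.toList := by
        rw [hdrop]
        exact List.take_left' hslen
      rw [← h1, htl, seg_of_slice L kk jj a.length i (by omega)]
    have hpi : p + i ≤ L.length := by omega
    refine ⟨p, hpi, hsp.symm, ?_⟩
    by_cases hb : b = []
    · -- extend left
      right
      have ha : a ≠ [] := by
        rintro rfl; simp [hb] at hlens; omega
      have hal : 1 ≤ a.length := by
        cases a; simp at ha; simp
      refine ⟨by omega, ?_⟩
      have hseg : (L.drop (p-1)).take (i+1) = (t.toList.drop (a.length - 1)).take (i+1) := by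
        rw [htl, seg_of_slice L kk jj (a.length - 1) (i+1) (by omega)]
        congr 2
        omega
      rw [hseg]
      exact (drop_take_infix t.toList (a.length - 1) (i+1)).trans hcom
    · -- extend right
      left
      have hbl : 1 ≤ b.length := by
        cases b; simp at hb; simp
      refine ⟨by omega, ?_⟩
      have hseg : (L.drop p).take (i+1) = (t.toList.drop a.length).take (i+1) := by
        rw [htl, seg_of_slice L kk jj a.length (i+1) (by omega)]
      rw [hseg]
      exact (drop_take_infix t.toList a.length (i+1)).trans hcom

lemma contained_iff_bwd (seq revCom : String) (i : Nat) (hi : 1 ≤ i)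
    (cs : List String) (hCov : pvCov seq revCom (i+1) cs)
    (s : String)
    (hex : ∃ p : Nat, p + i ≤ seq.toList.length ∧
        ((seq.toList.drop p).take i = s.toList) ∧
        ((p + i < seq.toList.length ∧ (seq.toList.drop p).take (i+1) <:+: revCom.toList) ∨
         (0 < p ∧ (seq.toList.drop (p-1)).take (i+1) <:+: revCom.toList))) :
    ∃ t ∈ cs, s.toList <:+: t.toList := by
  obtain ⟨p, hp, heq, hdisj⟩ := hex
  rcases hdisj with ⟨hlt, hinf⟩ | ⟨hpos, hinf⟩
  · obtain ⟨t, ht, htinf⟩ := hCov p (i+1) (by omega) (le_refl _) hinf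
    refine ⟨t, ht, ?_⟩
    have hpre : s.toList <+: (seq.toList.drop p).take (i+1) := by
      rw [← heq]
      have : (seq.toList.drop p).take i = ((seq.toList.drop p).take (i+1)).take i := by
        rw [List.take_take]
        congr 1
        omega
      rw [this]
      exact List.take_prefix _ _
    exact hpre.isInfix.trans htinf
  · obtain ⟨t, ht, htinf⟩ := hCov (p-1) (i+1) (by omega) (le_refl _) hinf
    refine ⟨t, ht, ?_⟩
    have hsuf : s.toList <:+ (seq.toList.drop (p-1)).take (i+1) := by
      rw [← heq, cons_head_drop p seq.toList (by omega) hpos i]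
      exact List.suffix_cons _ _
    exact hsuf.isInfix.trans htinf

-- named step functions (definitionally the loop bodies of the two ports)
def stepA (seq revCom : String) (i : Int) (cs : List String) (k : Int) : List String :=
  let s := PySem.Str.slice seq (some k) (some (i + k))
  if PySem.Str.isIn s revCom then
    if pvFlag s cs = 1 then cs ++ [s] else cs
  else cs

def stepB (seq revCom : String) (n i : Int) (st : List String × PySem.Set String) (k : Int) :
    List String × PySem.Set String :=
  let s := PySem.Str.slice seq (some k) (some (k + i))
  if PySem.Set.contains st.2 s || !PySem.Str.isIn s revCom then st
  else
    let seen := PySem.Set.add st.2 s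
    if !pvExtendable seq revCom n i s then (st.1 ++ [s], seen) else (st.1, seen)

lemma A_eq (seq revCom : String) (minLength : Int) :
    CommonSequence seq revCom minLength =
      (let C := (PySem.List.pyRange (PySem.Str.len seq) (minLength - 1) (-1)).foldl (fun cs i =>
          (PySem.List.pyRange 0 (PySem.Str.len seq - i + 1) 1).foldl (stepA seq revCom i) cs) [];
       if PySem.List.len C ≠ 0 then some C else none) := rfl

lemma B_eq (seq revCom : String) (minLength : Int) :
    CommonSequence_alt seq revCom minLength =
      (let st := (PySem.List.pyRange (PySem.Str.len seq) (max minLength 1 - 1) (-1)).foldl (fun st i =>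
          (PySem.List.pyRange 0 (PySem.Str.len seq - i + 1) 1).foldl
            (stepB seq revCom (PySem.Str.len seq) i) st) ([], PySem.Set.empty);
       if st.1 ≠ [] then some st.1 else none) := rfl

lemma pvFlag_eq_one_iff (s : String) (cs : List String) :
    pvFlag s cs = 1 ↔ ∀ t ∈ cs, ¬ (s.toList <:+: t.toList) := by
  unfold pvFlag
  rw [PySem.List.len_eq,
    PySem.List.foldl_pyRange_zero_pyGetD' cs "" (fun flag t => if flag = 1 ∧ PySem.Str.isIn s t then 0 else flag) 1]
  exact flag_foldl_one_iff s cs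

lemma pvCov_mono_list (seq revCom : String) (jmin : Nat) (cs cs' : List String)
    (hsub : ∀ t ∈ cs, t ∈ cs') : pvCov seq revCom jmin cs → pvCov seq revCom jmin cs' := by
  intro h kk jj h1 h2 h3
  obtain ⟨t, ht, hinf⟩ := h kk jj h1 h2 h3
  exact ⟨t, hsub t ht, hinf⟩

lemma pvInv_mono (seq revCom : String) (jmin jmin' : Nat) (h : jmin' ≤ jmin)
    (cs seen : List String) : pvInv seq revCom jmin cs seen → pvInv seq revCom jmin' cs seen := by
  rintro ⟨h1, h2⟩
  refine ⟨fun t ht => ?_, h2⟩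
  obtain ⟨hc, ⟨kk, jj, hkj, hij, htl⟩, hseen⟩ := h1 t ht
  exact ⟨hc, ⟨kk, jj, hkj, by omega, htl⟩, hseen⟩

lemma pair_step (seq revCom : String) (i k : Int) (hi : 1 ≤ i)
    (hk : 0 ≤ k) (hki : k + i ≤ (seq.toList.length : Int))
    (cs seen : List String)
    (hInv : pvInv seq revCom i.toNat cs seen) (hCov : pvCov seq revCom (i.toNat+1) cs) :
    stepA seq revCom i cs k = (stepB seq revCom (PySem.Str.len seq) i (cs, seen) k).1 ∧
    pvInv seq revCom i.toNat (stepB seq revCom (PySem.Str.len seq) i (cs, seen) k).1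
      (stepB seq revCom (PySem.Str.len seq) i (cs, seen) k).2 ∧
    (pvCommon revCom (PySem.Str.slice seq (some k) (some (i + k))) →
      ∃ t ∈ (stepB seq revCom (PySem.Str.len seq) i (cs, seen) k).1,
        (PySem.Str.slice seq (some k) (some (i + k))).toList <:+: t.toList) ∧
    (∀ t ∈ cs, t ∈ (stepB seq revCom (PySem.Str.len seq) i (cs, seen) k).1) := by
  have hsame : PySem.Str.slice seq (some k) (some (k + i)) =
      PySem.Str.slice seq (some k) (some (i + k)) := by rw [Int.add_comm]
  set s := PySem.Str.slice seq (some k) (some (i + k)) with hsdef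
  have hstl : s.toList = (seq.toList.drop k.toNat).take i.toNat :=
    toList_slice_nonneg seq k i hk (by omega)
  have hkiN : k.toNat + i.toNat ≤ seq.toList.length := by omega
  have hiN : 1 ≤ i.toNat := by omega
  have hicast : ((i.toNat : Nat) : Int) = i := by omega
  unfold stepA stepB
  simp only [← hsdef, hsame]
  by_cases hseen : s ∈ seen
  · -- s already seen: both sides skip
    obtain ⟨hcom, t, ht, hinf⟩ := hInv.2 s hseen
    have hcontains : PySem.Set.contains seen s = true := (PySem.Set.contains_iff seen s).mpr hseen
    have hisin : PySem.Str.isIn s revCom = true := (PySem.Str.isIn_iff_infix s revCom).mpr hcom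
    have hflag : pvFlag s cs ≠ 1 := by
      intro h1
      rw [pvFlag_eq_one_iff] at h1
      exact h1 t ht hinf
    simp only [hcontains, Bool.true_or, if_true, hisin, if_true, if_neg hflag]
    exact ⟨trivial, hInv, fun _ => ⟨t, ht, hinf⟩, fun t' ht' => ht'⟩
  · have hcontains : PySem.Set.contains seen s = false := by
      rw [← Bool.not_eq_true, PySem.Set.contains_iff]; exact hseen
    by_cases hcom : pvCommon revCom s
    · -- s common and new
      have hisin : PySem.Str.isIn s revCom = true := (PySem.Str.isIn_iff_infix s revCom).mpr hcom
      have hiff : (∃ t ∈ cs, s.toList <:+: t.toList) ↔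
          pvExtendable seq revCom (PySem.Str.len seq) i s = true := by
        rw [← hicast]
        constructor
        · rintro ⟨t, ht, hst⟩
          exact (pvExtendable_iff seq revCom i.toNat s).mpr
            (contained_iff_fwd seq revCom i.toNat k.toNat hiN hkiN cs seen
              hInv s hstl hseen t ht hst)
        · intro hx
          exact contained_iff_bwd seq revCom i.toNat hiN cs hCov s
            ((pvExtendable_iff seq revCom i.toNat s).mp hx)
      simp only [hcontains, Bool.false_or, hisin, Bool.not_true, if_false, if_true]
      by_cases hext : pvExtendable seq revCom (PySem.Str.len seq) i s = true
      · -- contained in an earlier entry: both skip (B records s as seen)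
        obtain ⟨t, ht, hinf⟩ := hiff.mpr hext
        have hflag : pvFlag s cs ≠ 1 := by
          intro h1
          rw [pvFlag_eq_one_iff] at h1
          exact h1 t ht hinf
        simp only [hext, Bool.not_true, if_false, if_neg hflag]
        refine ⟨rfl, ⟨?_, ?_⟩, fun _ => ⟨t, ht, hinf⟩, fun t' ht' => ht'⟩
        · intro t' ht'
          obtain ⟨h1, h2, h3⟩ := hInv.1 t' ht'
          exact ⟨h1, h2, (PySem.Set.mem_add seen s t').mpr (Or.inl h3)⟩
        · intro s' hs'
          rcases (PySem.Set.mem_add seen s s').mp hs' with hs'' | rfl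
          · exact hInv.2 s' hs''
          · exact ⟨hcom, t, ht, hinf⟩
      · -- genuinely new maximal entry: both append
        have hnone : ¬ ∃ t ∈ cs, s.toList <:+: t.toList := fun hx => hext (hiff.mp hx)
        have hflag : pvFlag s cs = 1 := by
          rw [pvFlag_eq_one_iff]
          intro t ht hinf
          exact hnone ⟨t, ht, hinf⟩
        have hextf : pvExtendable seq revCom (PySem.Str.len seq) i s = false :=
          Bool.not_eq_true _ ▸ eq_false_of_ne_true hext
        simp only [hextf, Bool.not_false, if_true, if_pos hflag]
        refine ⟨rfl, ⟨?_, ?_⟩, fun _ => ⟨s, List.mem_append_right _ (List.mem_singleton.mpr rfl), List.infix_rfl⟩,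
          fun t' ht' => List.mem_append_left _ ht'⟩
        · intro t' ht'
          rcases List.mem_append.mp ht' with ht'' | ht''
          · obtain ⟨h1, h2, h3⟩ := hInv.1 t' ht''
            exact ⟨h1, h2, (PySem.Set.mem_add seen s t').mpr (Or.inl h3)⟩
          · rw [List.mem_singleton.mp ht'']
            exact ⟨hcom, ⟨k.toNat, i.toNat, hkiN, le_refl _, hstl⟩,
              (PySem.Set.mem_add seen s s).mpr (Or.inr rfl)⟩
        · intro s' hs'
          rcases (PySem.Set.mem_add seen s s').mp hs' with hs'' | rfl
          · obtain ⟨h1, t, ht, hinf⟩ := hInv.2 s' hs''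
            exact ⟨h1, t, List.mem_append_left _ ht, hinf⟩
          · exact ⟨hcom, s, List.mem_append_right _ (List.mem_singleton.mpr rfl), List.infix_rfl⟩
    · -- s not common: both skip
      have hisin : PySem.Str.isIn s revCom = false := by
        rw [← Bool.not_eq_true, PySem.Str.isIn_iff_infix]; exact hcom
      simp only [hcontains, Bool.false_or, hisin, Bool.not_false, if_true]
      exact ⟨by simp, hInv, fun hc => absurd hc hcom, fun t' ht' => ht'⟩

lemma row_fold (seq revCom : String) (i : Int) (hi : 1 ≤ i) :
    ∀ (ks : List Int), (∀ k ∈ ks, 0 ≤ k ∧ k + i ≤ (seq.toList.length : Int)) →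
    ∀ (cs seen : List String), pvInv seq revCom i.toNat cs seen →
      pvCov seq revCom (i.toNat+1) cs →
      ks.foldl (stepA seq revCom i) cs =
        (ks.foldl (stepB seq revCom (PySem.Str.len seq) i) (cs, seen)).1 ∧
      pvInv seq revCom i.toNat (ks.foldl (stepB seq revCom (PySem.Str.len seq) i) (cs, seen)).1
        (ks.foldl (stepB seq revCom (PySem.Str.len seq) i) (cs, seen)).2 ∧
      pvCov seq revCom (i.toNat+1) (ks.foldl (stepB seq revCom (PySem.Str.len seq) i) (cs, seen)).1 ∧
      (∀ k ∈ ks, pvCommon revCom (PySem.Str.slice seq (some k) (some (i + k))) →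
        ∃ t ∈ (ks.foldl (stepB seq revCom (PySem.Str.len seq) i) (cs, seen)).1,
          (PySem.Str.slice seq (some k) (some (i + k))).toList <:+: t.toList) ∧
      (∀ t ∈ cs, t ∈ (ks.foldl (stepB seq revCom (PySem.Str.len seq) i) (cs, seen)).1) := by
  intro ks
  induction ks with
  | nil =>
    intro _ cs seen hInv hCov
    exact ⟨rfl, hInv, hCov, by simp, fun t ht => ht⟩
  | cons k ks ih =>
    intro hks cs seen hInv hCov
    obtain ⟨hk0, hki⟩ := hks k (List.mem_cons_self)
    obtain ⟨heq1, hInv1, hcomm1, hsub1⟩ :=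
      pair_step seq revCom i k hi hk0 hki cs seen hInv hCov
    have hCov1 : pvCov seq revCom (i.toNat+1)
        (stepB seq revCom (PySem.Str.len seq) i (cs, seen) k).1 :=
      pvCov_mono_list seq revCom (i.toNat+1) cs _ hsub1 hCov
    have hmk : ((stepB seq revCom (PySem.Str.len seq) i (cs, seen) k).1,
        (stepB seq revCom (PySem.Str.len seq) i (cs, seen) k).2) =
        stepB seq revCom (PySem.Str.len seq) i (cs, seen) k := rfl
    obtain ⟨ih1, ih2, ih3, ih4, ih5⟩ :=
      ih (fun k' hk' => hks k' (List.mem_cons_of_mem _ hk'))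
        (stepB seq revCom (PySem.Str.len seq) i (cs, seen) k).1
        (stepB seq revCom (PySem.Str.len seq) i (cs, seen) k).2 hInv1 hCov1
    rw [hmk] at ih1 ih2 ih3 ih4 ih5
    simp only [List.foldl_cons, heq1]
    refine ⟨ih1, ih2, ih3, ?_, fun t ht => ih5 t (hsub1 t ht)⟩
    intro k' hk' hc
    rcases List.mem_cons.mp hk' with rfl | hk''
    · obtain ⟨t, ht, hinf⟩ := hcomm1 hc
      exact ⟨t, ih5 t ht, hinf⟩
    · exact ih4 k' hk'' hc

lemma row_cov (seq revCom : String) (i : Int) (hi : 1 ≤ i) (hiN : i ≤ (seq.toList.length : Int))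
    (cs' : List String)
    (hCov' : pvCov seq revCom (i.toNat+1) cs')
    (hcomm : ∀ k ∈ PySem.List.pyRange 0 (PySem.Str.len seq - i + 1) 1,
      pvCommon revCom (PySem.Str.slice seq (some k) (some (i + k))) →
        ∃ t ∈ cs', (PySem.Str.slice seq (some k) (some (i + k))).toList <:+: t.toList) :
    pvCov seq revCom i.toNat cs' := by
  intro kk jj h1 h2 h3
  by_cases hjj : i.toNat + 1 ≤ jj
  · exact hCov' kk jj h1 hjj h3
  · have hjeq : jj = i.toNat := by omega
    subst hjeq
    have hmem : (kk : Int) ∈ PySem.List.pyRange 0 (PySem.Str.len seq - i + 1) 1 := by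
      rw [PySem.List.mem_pyRange_one, PySem.Str.len_eq]
      omega
    have htl : (PySem.Str.slice seq (some (kk : Int)) (some (i + kk))).toList =
        (seq.toList.drop kk).take i.toNat := by
      have := toList_slice_nonneg seq kk i (by omega) (by omega)
      simpa using this
    have hc : pvCommon revCom (PySem.Str.slice seq (some (kk : Int)) (some (i + kk))) := by
      unfold pvCommon
      rw [htl]
      exact h3
    obtain ⟨t, ht, hinf⟩ := hcomm (kk : Int) hmem hc
    rw [htl] at hinf
    exact ⟨t, ht, hinf⟩

lemma main_loop (seq revCom : String) (lo : Int) (hlo : 1 ≤ lo) :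
    ∀ (fuel : Nat) (i : Int), (i - lo + 1).toNat ≤ fuel → lo - 1 ≤ i →
      i ≤ (seq.toList.length : Int) →
    ∀ (cs seen : List String), pvInv seq revCom i.toNat cs seen →
      pvCov seq revCom (i.toNat+1) cs →
      ((PySem.List.pyRange i (lo - 1) (-1)).foldl (fun cs' j =>
          (PySem.List.pyRange 0 (PySem.Str.len seq - j + 1) 1).foldl (stepA seq revCom j) cs') cs =
        ((PySem.List.pyRange i (lo - 1) (-1)).foldl (fun st j =>
          (PySem.List.pyRange 0 (PySem.Str.len seq - j + 1) 1).foldl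
            (stepB seq revCom (PySem.Str.len seq) j) st) (cs, seen)).1) ∧
      pvCov seq revCom lo.toNat
        ((PySem.List.pyRange i (lo - 1) (-1)).foldl (fun st j =>
          (PySem.List.pyRange 0 (PySem.Str.len seq - j + 1) 1).foldl
            (stepB seq revCom (PySem.Str.len seq) j) st) (cs, seen)).1 := by
  intro fuel
  induction fuel with
  | zero =>
    intro i hfuel hge hle cs seen hInv hCov
    have hieq : i = lo - 1 := by omega
    subst hieq
    rw [PySem.List.pyRange_neg_one_eq_nil (le_refl _)]
    have hlev : lo.toNat = (lo - 1).toNat + 1 := by omega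
    exact ⟨rfl, hlev ▸ hCov⟩
  | succ fuel ih =>
    intro i hfuel hge hle cs seen hInv hCov
    by_cases hcase : i = lo - 1
    · subst hcase
      rw [PySem.List.pyRange_neg_one_eq_nil (le_refl _)]
      have hlev : lo.toNat = (lo - 1).toNat + 1 := by omega
      exact ⟨rfl, hlev ▸ hCov⟩
    · have hlt : lo - 1 < i := by omega
      have hi1 : 1 ≤ i := by omega
      rw [PySem.List.pyRange_neg_one_cons hlt]
      simp only [List.foldl_cons]
      have hks : ∀ k ∈ PySem.List.pyRange 0 (PySem.Str.len seq - i + 1) 1,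
          0 ≤ k ∧ k + i ≤ (seq.toList.length : Int) := by
        intro k hk
        rw [PySem.List.mem_pyRange_one, PySem.Str.len_eq] at hk
        omega
      obtain ⟨heq, hInv', hCov', hcomm, hsub⟩ :=
        row_fold seq revCom i hi1 (PySem.List.pyRange 0 (PySem.Str.len seq - i + 1) 1) hks
          cs seen hInv hCov
      set r := (PySem.List.pyRange 0 (PySem.Str.len seq - i + 1) 1).foldl
        (stepB seq revCom (PySem.Str.len seq) i) (cs, seen) with hrdef
      have hCovI : pvCov seq revCom i.toNat r.1 :=
        row_cov seq revCom i hi1 hle r.1 hCov' hcomm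
      have hInvI : pvInv seq revCom (i-1).toNat r.1 r.2 :=
        pvInv_mono seq revCom i.toNat (i-1).toNat (by omega) r.1 r.2 hInv'
      have hCovI' : pvCov seq revCom ((i-1).toNat+1) r.1 := by
        have : (i-1).toNat + 1 = i.toNat := by omega
        rw [this]
        exact hCovI
      have hmk : (r.1, r.2) = r := rfl
      obtain ⟨ih1, ih2⟩ := ih (i-1) (by omega) (by omega) (by omega) r.1 r.2 hInvI hCovI'
      rw [hmk] at ih1 ih2
      rw [heq]
      exact ⟨ih1, ih2⟩

lemma toList_slice_clamp (seq : String) (a b : Int) :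
    (PySem.Str.slice seq (some a) (some b)).toList =
      (seq.toList.drop (PySem.List.clampIdx seq.toList.length a)).take
        (PySem.List.clampIdx seq.toList.length b - PySem.List.clampIdx seq.toList.length a) := by
  simp [PySem.Str.slice, PySem.List.slice]

lemma slice_isSeg (seq : String) (a b : Int) :
    ∃ kk jj : Nat, kk + jj ≤ seq.toList.length ∧
      (PySem.Str.slice seq (some a) (some b)).toList = (seq.toList.drop kk).take jj := by
  refine ⟨PySem.List.clampIdx seq.toList.length a,
    PySem.List.clampIdx seq.toList.length b - PySem.List.clampIdx seq.toList.length a, ?_,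
    toList_slice_clamp seq a b⟩
  have h1 := PySem.List.clampIdx_le seq.toList.length a
  have h2 := PySem.List.clampIdx_le seq.toList.length b
  omega

lemma slice_stop_zero (seq : String) (a : Int) :
    (PySem.Str.slice seq (some a) (some ((0:Int)))).toList = [] := by
  rw [toList_slice_clamp]
  have : PySem.List.clampIdx seq.toList.length 0 = 0 := by
    unfold PySem.List.clampIdx
    simp
  rw [this]
  simp

lemma empty_of_toList_nil (s : String) (h : s.toList = []) : s = "" :=
  String.toList_inj.mp (by rw [h]; rfl)

lemma pvFlag_ne_one_of_nonempty (s : String) (cs : List String) (hcs : cs ≠ [])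
    (hnil : s.toList = []) : pvFlag s cs ≠ 1 := by
  intro h1
  rw [pvFlag_eq_one_iff] at h1
  obtain ⟨t, ts, rfl⟩ := List.exists_cons_of_ne_nil hcs
  exact h1 t (List.mem_cons_self) (by rw [hnil]; exact List.nil_infix)

lemma step_identity (seq revCom : String) (i k : Int) (hk : 0 ≤ k)
    (cs : List String) (hcs : cs ≠ []) (hCov : pvCov seq revCom 1 cs) :
    stepA seq revCom i cs k = cs := by
  unfold stepA
  set s := PySem.Str.slice seq (some k) (some (i + k)) with hsdef
  by_cases hnil : s.toList = []
  · have hisin : PySem.Str.isIn s revCom = true := by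
      rw [PySem.Str.isIn_iff_infix, hnil]
      exact List.nil_infix
    rw [if_pos hisin, if_neg (pvFlag_ne_one_of_nonempty s cs hcs hnil)]
  · by_cases hisin : PySem.Str.isIn s revCom = true
    · obtain ⟨kk, jj, hkj, hseg⟩ := slice_isSeg seq k (i + k)
      have hjj : 1 ≤ jj := by
        rcases Nat.eq_zero_or_pos jj with rfl | h
        · exact absurd (by rw [hseg]; simp) hnil
        · omega
      have hcom : (seq.toList.drop kk).take jj <:+: revCom.toList := by
        rw [← hseg]
        exact (PySem.Str.isIn_iff_infix s revCom).mp hisin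
      obtain ⟨t, ht, hinf⟩ := hCov kk jj hkj hjj hcom
      have hflag : pvFlag s cs ≠ 1 := by
        intro h1
        rw [pvFlag_eq_one_iff] at h1
        exact h1 t ht (by rw [hseg]; exact hinf)
      rw [if_pos hisin, if_neg hflag]
    · rw [if_neg hisin]

lemma row_identity (seq revCom : String) (i : Int) (ks : List Int)
    (hks : ∀ k ∈ ks, 0 ≤ k) (cs : List String) (hcs : cs ≠ [])
    (hCov : pvCov seq revCom 1 cs) :
    ks.foldl (stepA seq revCom i) cs = cs := by
  induction ks with
  | nil => rfl
  | cons k ks ih =>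
    rw [List.foldl_cons, step_identity seq revCom i k (hks k (List.mem_cons_self)) cs hcs hCov]
    exact ih (fun k' hk' => hks k' (List.mem_cons_of_mem _ hk'))

lemma step_from_nil (seq revCom : String) (i k : Int)
    (hCov : pvCov seq revCom 1 ([] : List String)) :
    stepA seq revCom i [] k = [] ∨ stepA seq revCom i [] k = [""] := by
  unfold stepA
  set s := PySem.Str.slice seq (some k) (some (i + k)) with hsdef
  by_cases hnil : s.toList = []
  · right
    have hisin : PySem.Str.isIn s revCom = true := by
      rw [PySem.Str.isIn_iff_infix, hnil]
      exact List.nil_infix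
    have hflag : pvFlag s [] = 1 := by
      rw [pvFlag_eq_one_iff]; simp
    rw [if_pos hisin, if_pos hflag, empty_of_toList_nil s hnil]
    rfl
  · left
    by_cases hisin : PySem.Str.isIn s revCom = true
    · exfalso
      obtain ⟨kk, jj, hkj, hseg⟩ := slice_isSeg seq k (i + k)
      have hjj : 1 ≤ jj := by
        rcases Nat.eq_zero_or_pos jj with rfl | h
        · exact absurd (by rw [hseg]; simp) hnil
        · omega
      obtain ⟨t, ht, _⟩ := hCov kk jj hkj hjj
        (by rw [← hseg]; exact (PySem.Str.isIn_iff_infix s revCom).mp hisin)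
      exact absurd ht (List.not_mem_nil)
    · rw [if_neg hisin]

lemma step_from_nil_empty (seq revCom : String) (i k : Int)
    (hnil : (PySem.Str.slice seq (some k) (some (i + k))).toList = []) :
    stepA seq revCom i [] k = [""] := by
  unfold stepA
  set s := PySem.Str.slice seq (some k) (some (i + k)) with hsdef
  have hisin : PySem.Str.isIn s revCom = true := by
    rw [PySem.Str.isIn_iff_infix, hnil]
    exact List.nil_infix
  have hflag : pvFlag s [] = 1 := by
    rw [pvFlag_eq_one_iff]; simp
  rw [if_pos hisin, if_pos hflag, empty_of_toList_nil s hnil]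
  rfl

lemma fold_from_nil_cases (seq revCom : String) (i : Int) (ks : List Int)
    (hks : ∀ k ∈ ks, 0 ≤ k)
    (hCov : pvCov seq revCom 1 ([] : List String)) :
    ∀ cs : List String, cs = [] ∨ cs = [""] →
      ks.foldl (stepA seq revCom i) cs = [] ∨ ks.foldl (stepA seq revCom i) cs = [""] := by
  induction ks with
  | nil => intro cs h; exact h
  | cons k ks ih =>
    intro cs h
    rw [List.foldl_cons]
    rcases h with rfl | rfl
    · exact ih (fun k' hk' => hks k' (List.mem_cons_of_mem _ hk'))
        (stepA seq revCom i [] k) (step_from_nil seq revCom i k hCov)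
    · rw [step_identity seq revCom i k (hks k (List.mem_cons_self)) [""] (by simp)
        (pvCov_mono_list seq revCom 1 [] [""] (by simp) hCov)]
      exact ih (fun k' hk' => hks k' (List.mem_cons_of_mem _ hk')) [""] (Or.inr rfl)

lemma row_from_nil (seq revCom : String) (i : Int) (hi : i ≤ 0)
    (hCov : pvCov seq revCom 1 ([] : List String)) :
    (PySem.List.pyRange 0 (PySem.Str.len seq - i + 1) 1).foldl (stepA seq revCom i) [] = [""] := by
  have hsplit : PySem.List.pyRange 0 (PySem.Str.len seq - i + 1) 1 =
      PySem.List.pyRange 0 (-i) 1 ++ PySem.List.pyRange (-i) (PySem.Str.len seq - i + 1) 1 := by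
    rw [PySem.Str.len_eq]
    exact PySem.List.pyRange_one_append 0 (-i) _ (by omega) (by omega)
  have hcons : PySem.List.pyRange (-i) (PySem.Str.len seq - i + 1) 1 =
      (-i) :: PySem.List.pyRange (-i + 1) (PySem.Str.len seq - i + 1) 1 := by
    rw [PySem.Str.len_eq]
    rw [PySem.List.pyRange_one_cons (by omega)]
  rw [hsplit, List.foldl_append, hcons, List.foldl_cons]
  have hmid : ∀ cs : List String, cs = [] ∨ cs = [""] →
      stepA seq revCom i cs (-i) = [""] := by
    intro cs h
    rcases h with rfl | rfl
    · apply step_from_nil_empty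
      have : i + -i = (0 : Int) := by ring
      rw [this]
      exact slice_stop_zero seq (-i)
    · exact step_identity seq revCom i (-i) (by omega) [""] (by simp)
        (pvCov_mono_list seq revCom 1 [] [""] (by simp) hCov)
  rw [hmid _ (fold_from_nil_cases seq revCom i (PySem.List.pyRange 0 (-i) 1)
    (fun k hk => ((PySem.List.mem_pyRange_one).mp hk).1) hCov [] (Or.inl rfl))]
  apply row_identity
  · intro k hk
    rw [PySem.Str.len_eq, PySem.List.mem_pyRange_one] at hk
    omega
  · simp
  · exact pvCov_mono_list seq revCom 1 [] [""] (by simp) hCov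

lemma phase2_identity (seq revCom : String) (iss : List Int) (cs : List String)
    (hcs : cs ≠ []) (hCov : pvCov seq revCom 1 cs) :
    iss.foldl (fun cs' j =>
      (PySem.List.pyRange 0 (PySem.Str.len seq - j + 1) 1).foldl (stepA seq revCom j) cs') cs = cs := by
  induction iss with
  | nil => rfl
  | cons j iss ih =>
    rw [List.foldl_cons, row_identity seq revCom j _
      (fun k hk => ((PySem.List.mem_pyRange_one).mp hk).1) cs hcs hCov]
    exact ih

lemma phase2_fold (seq revCom : String) (ml : Int) (hml : ml ≤ 0) (cs : List String)
    (hCov : pvCov seq revCom 1 cs) :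
    (PySem.List.pyRange 0 (ml - 1) (-1)).foldl (fun cs' j =>
      (PySem.List.pyRange 0 (PySem.Str.len seq - j + 1) 1).foldl (stepA seq revCom j) cs') cs =
    (if cs = [] then [""] else cs) := by
  rw [PySem.List.pyRange_neg_one_cons (by omega : ml - 1 < 0), List.foldl_cons]
  by_cases hcs : cs = []
  · subst hcs
    rw [if_pos rfl]
    rw [row_from_nil seq revCom 0 (le_refl _) hCov]
    exact phase2_identity seq revCom _ [""] (by simp)
      (pvCov_mono_list seq revCom 1 [] [""] (by simp) hCov)
  · rw [if_neg hcs]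
    rw [row_identity seq revCom 0 _
      (fun k hk => ((PySem.List.mem_pyRange_one).mp hk).1) cs hcs hCov]
    exact phase2_identity seq revCom _ cs hcs hCov

lemma pyRange_neg_append (a m b : Int) (h1 : b ≤ m) (h2 : m ≤ a) :
    PySem.List.pyRange a b (-1) =
      PySem.List.pyRange a m (-1) ++ PySem.List.pyRange m b (-1) := by
  rw [PySem.List.pyRange_neg_one_eq_reverse a b, PySem.List.pyRange_neg_one_eq_reverse a m,
    PySem.List.pyRange_neg_one_eq_reverse m b,
    PySem.List.pyRange_one_append (b+1) (m+1) (a+1) (by omega) (by omega),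
    List.reverse_append]

lemma pvInv_nil (seq revCom : String) (jmin : Nat) : pvInv seq revCom jmin [] [] :=
  ⟨fun t ht => absurd ht (List.not_mem_nil), fun s hs => absurd hs (List.not_mem_nil)⟩

lemma pvCov_top (seq revCom : String) :
    pvCov seq revCom (seq.toList.length + 1) [] := by
  intro kk jj h1 h2 h3
  omega

-- no common character ⇒ no common substring of length ≥ 1
lemma no_common_seg (seq revCom : String)
    (H : ∀ c ∈ seq.toList, c ∉ revCom.toList) (kk jj : Nat)
    (hkj : kk + jj ≤ seq.toList.length) (hjj : 1 ≤ jj) :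
    ¬ (seq.toList.drop kk).take jj <:+: revCom.toList := by
  intro hinf
  have hne : (seq.toList.drop kk).take jj ≠ [] := by
    intro h
    have := congrArg List.length h
    rw [List.length_take, List.length_drop, List.length_nil] at this
    omega
  obtain ⟨c, hc⟩ := List.exists_mem_of_ne_nil _ hne
  have hcseq : c ∈ seq.toList :=
    (drop_take_infix seq.toList kk jj).subset hc
  have hcrev : c ∈ revCom.toList := hinf.subset hc
  exact H c hcseq hcrev

lemma no_common_cov (seq revCom : String)
    (H : ∀ c ∈ seq.toList, c ∉ revCom.toList) :
    pvCov seq revCom 1 ([] : List String) := by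
  intro kk jj h1 h2 h3
  exact absurd h3 (no_common_seg seq revCom H kk jj h1 h2)

lemma no_common_isIn (seq revCom : String)
    (H : ∀ c ∈ seq.toList, c ∉ revCom.toList) (i k : Int)
    (hi : 1 ≤ i) (hk : 0 ≤ k) (hki : k + i ≤ (seq.toList.length : Int)) (b : Int)
    (hb : b = i + k ∨ b = k + i) :
    PySem.Str.isIn (PySem.Str.slice seq (some k) (some b)) revCom = false := by
  have hbv : b = i + k := by rcases hb with h | h; exact h; omega
  subst hbv
  rw [← Bool.not_eq_true, PySem.Str.isIn_iff_infix,
    toList_slice_nonneg seq k i hk (by omega)]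
  exact no_common_seg seq revCom H k.toNat i.toNat (by omega) (by omega)

lemma foldl_fixed {α β : Type} (f : α → β → α) (l : List β) (a : α)
    (h : ∀ b ∈ l, ∀ x, f x b = x) : l.foldl f a = a := by
  induction l generalizing a with
  | nil => rfl
  | cons b l ih =>
    rw [List.foldl_cons, h b (List.mem_cons_self)]
    exact ih a (fun b' hb' => h b' (List.mem_cons_of_mem _ hb'))

lemma mem_pyRange_neg_one (a b i : Int) :
    i ∈ PySem.List.pyRange a b (-1) ↔ b < i ∧ i ≤ a := by
  rw [PySem.List.pyRange_neg_one_eq_reverse, List.mem_reverse,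
    PySem.List.mem_pyRange_one]
  omega

-- under no common character, one A-row with 1 ≤ i is the identity on any cs
lemma rowA_noop (seq revCom : String)
    (H : ∀ c ∈ seq.toList, c ∉ revCom.toList) (i : Int) (hi : 1 ≤ i)
    (cs : List String) :
    (PySem.List.pyRange 0 (PySem.Str.len seq - i + 1) 1).foldl (stepA seq revCom i) cs = cs := by
  apply foldl_fixed
  intro k hk cs'
  rw [PySem.List.mem_pyRange_one, PySem.Str.len_eq] at hk
  unfold stepA
  rw [if_neg (by
    rw [no_common_isIn seq revCom H i k hi (by omega) (by omega) (i + k) (Or.inl rfl)]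
    simp)]

-- under no common character, one B-row with 1 ≤ i is the identity on any state
lemma rowB_noop (seq revCom : String)
    (H : ∀ c ∈ seq.toList, c ∉ revCom.toList) (i : Int) (hi : 1 ≤ i)
    (st : List String × PySem.Set String) :
    (PySem.List.pyRange 0 (PySem.Str.len seq - i + 1) 1).foldl
      (stepB seq revCom (PySem.Str.len seq) i) st = st := by
  apply foldl_fixed
  intro k hk st'
  rw [PySem.List.mem_pyRange_one, PySem.Str.len_eq] at hk
  unfold stepB
  rw [if_pos (by
    rw [no_common_isIn seq revCom H i k hi (by omega) (by omega) (k + i) (Or.inr rfl)]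
    simp)]

-- L3: inside D_, A returns some [""] and B returns none
lemma final_diff (seq revCom : String) (minLength : Int) (hml : minLength ≤ 0)
    (H : ∀ c ∈ seq.toList, c ∉ revCom.toList) :
    CommonSequence seq revCom minLength = some [""] ∧
    CommonSequence_alt seq revCom minLength = none := by
  have hN0 : (0:Int) ≤ (seq.toList.length : Int) := by positivity
  have hCov0 := no_common_cov seq revCom H
  constructor
  · rw [A_eq]
    dsimp only
    have hsplit : PySem.List.pyRange (PySem.Str.len seq) (minLength - 1) (-1) =
        PySem.List.pyRange (PySem.Str.len seq) 0 (-1) ++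
          PySem.List.pyRange 0 (minLength - 1) (-1) := by
      rw [PySem.Str.len_eq]
      exact pyRange_neg_append _ 0 _ (by omega) (by omega)
    rw [hsplit, List.foldl_append]
    have hfirst : (PySem.List.pyRange (PySem.Str.len seq) 0 (-1)).foldl (fun cs i =>
        (PySem.List.pyRange 0 (PySem.Str.len seq - i + 1) 1).foldl (stepA seq revCom i) cs)
        ([] : List String) = [] := by
      apply foldl_fixed
      intro i hi cs
      rw [mem_pyRange_neg_one] at hi
      exact rowA_noop seq revCom H i (by omega) cs
    rw [hfirst, phase2_fold seq revCom minLength hml [] hCov0, if_pos rfl]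
    simp [PySem.List.len_eq]
  · rw [B_eq]
    dsimp only
    have hmax : max minLength 1 = 1 := max_eq_right (by omega)
    have hz : max minLength 1 - 1 = 0 := by omega
    rw [hz]
    have hfold : (PySem.List.pyRange (PySem.Str.len seq) 0 (-1)).foldl (fun st i =>
        (PySem.List.pyRange 0 (PySem.Str.len seq - i + 1) 1).foldl
          (stepB seq revCom (PySem.Str.len seq) i) st)
        (([], PySem.Set.empty) : List String × PySem.Set String) = ([], PySem.Set.empty) := by
      apply foldl_fixed
      intro i hi st
      rw [mem_pyRange_neg_one] at hi
      exact rowB_noop seq revCom H i (by omega) st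
    rw [hfold]
    simp

-- ===== VERDICT (by name: the statement is the Claim_ definition above) =====
theorem CommonSequence_spec : Claim_unchanged_CommonSequence := by
  intro seq revCom minLength _
  unfold Spec_CommonSequence D_CommonSequence
  intro hnD
  rw [A_eq, B_eq]
  dsimp only
  by_cases hbig : (seq.toList.length : Int) < minLength
  · have hml1 : (1:Int) ≤ minLength := by
      have : (0:Int) ≤ (seq.toList.length : Int) := by positivity
      omega
    have hnilA : PySem.List.pyRange (PySem.Str.len seq) (minLength - 1) (-1) = [] := by
      rw [PySem.Str.len_eq]
      exact PySem.List.pyRange_neg_one_eq_nil (by omega)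
    have hmax : max minLength 1 = minLength := max_eq_left hml1
    have hnilB : PySem.List.pyRange (PySem.Str.len seq) (max minLength 1 - 1) (-1) = [] := by
      rw [PySem.Str.len_eq, hmax]
      exact PySem.List.pyRange_neg_one_eq_nil (by omega)
    rw [hnilA, hnilB]
    simp [PySem.List.len_eq]
  · push_neg at hbig
    have hN0 : (0:Int) ≤ (seq.toList.length : Int) := by positivity
    have hlo1 : (1:Int) ≤ max minLength 1 := le_max_right _ _
    have hloN : max minLength 1 - 1 ≤ (seq.toList.length : Int) := by
      rcases le_or_gt minLength 1 with h | h
      · rw [max_eq_right h]; omega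
      · rw [max_eq_left (by omega)]; omega
    have hInv0 : pvInv seq revCom ((seq.toList.length : Int)).toNat [] [] :=
      pvInv_nil seq revCom _
    have hCov0 : pvCov seq revCom (((seq.toList.length : Int)).toNat + 1) [] := by
      rw [Int.toNat_natCast]
      exact pvCov_top seq revCom
    obtain ⟨heq, hcov⟩ := main_loop seq revCom (max minLength 1) hlo1
      (((seq.toList.length : Int) - max minLength 1 + 1).toNat) (seq.toList.length : Int)
      (le_refl _) (by omega) (le_refl _) [] [] hInv0 hCov0
    rcases le_or_gt 1 minLength with hml | hml
    · -- no phase 2: the two outer ranges coincide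
      have hmax : max minLength 1 = minLength := max_eq_left hml
      rw [PySem.Str.len_eq] at heq
      rw [hmax] at heq
      rw [PySem.Str.len_eq seq, hmax, heq]
      split_ifs with h1 h2 <;> simp_all [PySem.List.len_eq]
    · -- minLength ≤ 0 : phase 2 is the identity because the result is nonempty
      have hml0 : minLength ≤ 0 := by omega
      obtain ⟨c, hcseq, hcrev⟩ : ∃ c ∈ seq.toList, c ∈ revCom.toList := by
        by_contra hno
        push_neg at hno
        exact hnD ⟨hml0, hno⟩
      have hmax : max minLength 1 = 1 := max_eq_right (by omega)
      rw [PySem.Str.len_eq] at heq hcov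
      rw [hmax] at heq hcov
      rw [PySem.Str.len_eq seq, hmax]
      simp only [show (PySem.Set.empty : PySem.Set String) = [] from rfl]
      set cs := ((PySem.List.pyRange ((seq.toList.length : Nat) : Int) (1 - 1) (-1)).foldl
        (fun st j => (PySem.List.pyRange 0 (((seq.toList.length : Nat) : Int) - j + 1) 1).foldl
          (stepB seq revCom ((seq.toList.length : Nat) : Int) j) st)
        ([], ([] : PySem.Set String))).1 with hcsdef
    -- cs is nonempty: the common character c gives a common substring of length 1
      have hcovP : pvCov seq revCom 1 cs := by
        have h1 : ((1:Int)).toNat = 1 := rfl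
        rw [h1] at hcov
        exact hcov
      obtain ⟨pre, suf, hps⟩ := List.append_of_mem hcseq
      have hcs_ne : cs ≠ [] := by
        have hseg : (seq.toList.drop pre.length).take 1 = [c] := by
          rw [hps, List.drop_left]
          rfl
        have hlen : pre.length + 1 ≤ seq.toList.length := by
          rw [hps]; simp
        have hinf : (seq.toList.drop pre.length).take 1 <:+: revCom.toList := by
          rw [hseg]
          obtain ⟨pre', suf', hps'⟩ := List.append_of_mem hcrev
          exact ⟨pre', suf', by rw [hps']; simp⟩
        obtain ⟨t, ht, _⟩ := hcovP pre.length 1 hlen (le_refl _) hinf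
        intro hnil
        rw [hnil] at ht
        exact absurd ht (List.not_mem_nil)
      have hsplit : PySem.List.pyRange ((seq.toList.length : Nat) : Int) (minLength - 1) (-1) =
          PySem.List.pyRange ((seq.toList.length : Nat) : Int) (1 - 1) (-1) ++
            PySem.List.pyRange (1 - 1) (minLength - 1) (-1) :=
        pyRange_neg_append _ _ _ (by omega) (by omega)
      rw [hsplit, List.foldl_append, heq]
      have hph := phase2_fold seq revCom minLength hml0 cs hcovP
      rw [PySem.Str.len_eq] at hph
      rw [show (1:Int) - 1 = 0 from rfl, hph, if_neg hcs_ne]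
      split_ifs with h1 h2 <;> simp_all [PySem.List.len_eq]

theorem CommonSequence_changed : Claim_changed_CommonSequence := by
  unfold Claim_changed_CommonSequence pvDiffWitness_CommonSequence pvDiffWitnessOut_CommonSequence D_CommonSequence
  dsimp only
  have hH : ∀ c ∈ "a".toList, c ∉ "b".toList := by
    intro c hc
    simp at hc ⊢
    subst hc
    decide
  have hd := final_diff "a" "b" 0 (by norm_num) hH
  refine ⟨?_, ⟨by norm_num, hH⟩, hd.1, hd.2, by decide⟩
  unfold Dom_CommonSequence pvDomStr pvDomInt
  simp [pvDomChar]

theorem CommonSequence_tight : Claim_exact_CommonSequence := by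
  intro seq revCom minLength _ hD
  obtain ⟨hml, H⟩ := hD
  obtain ⟨hA, hB⟩ := final_diff seq revCom minLength hml H
  rw [hA, hB]
  simp
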